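-- pv_equiv track=rewrite | github.com/aleubeto/UF_AnalisisyDisenoDeAlgoritmosAvanzados | Tareas/Act5.2/main.py | dinamic_chart
-- ===== SOURCE A (Python) =====
-- def dinamic_chart(matrix):
--     dinamicChart = []
--     for i in range(len(matrix)):
--         temp = []
--         for j in range(100):
--             if j+1 in matrix[i]:
--                 temp.append(1)
--             else:
--                 temp.append(0)
--         dinamicChart.append(temp)
--     return dinamicChart
-- ===== SOURCE B (Python) =====
-- def dinamic_chart(matrix):
--     dinamicChart = []
--     for row in matrix:
--         temp = [0] * 100
--         for v in row:
--             if 1 <= v <= 100: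
--                 temp[v - 1] = 1
--         dinamicChart.append(temp)
--     return dinamicChart
-- ===== Notes on version B (the rewrite author's own statement) =====
-- stated objective: faster
-- what changed: B scatters each row's values into a preallocated 100-slot array (one pass over the row) instead of testing membership of each of the 100 candidates in the row with an inner linear scan.
import Mathlib
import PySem

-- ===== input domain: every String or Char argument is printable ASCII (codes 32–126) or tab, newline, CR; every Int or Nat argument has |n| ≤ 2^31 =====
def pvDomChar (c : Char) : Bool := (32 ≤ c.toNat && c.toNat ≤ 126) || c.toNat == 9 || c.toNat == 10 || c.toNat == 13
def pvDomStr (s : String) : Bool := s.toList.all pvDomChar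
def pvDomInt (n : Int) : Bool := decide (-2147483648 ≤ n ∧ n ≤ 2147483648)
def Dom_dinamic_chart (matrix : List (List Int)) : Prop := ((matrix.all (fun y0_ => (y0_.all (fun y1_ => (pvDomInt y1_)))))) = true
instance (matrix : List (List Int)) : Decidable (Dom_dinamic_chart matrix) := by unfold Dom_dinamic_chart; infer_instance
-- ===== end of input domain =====

-- B builds each row by scattering its values into a preallocated 100-slot array (one pass
-- over the row) instead of A's membership test for each of the 100 candidate values.

-- ===== PORT A =====
-- literal port: for i in range(len(matrix)), inner loop for j in range(100) appending 1/0
def dinamic_chart (matrix : List (List Int)) : List (List Int) :=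
  (PySem.List.pyRange 0 matrix.length 1).foldl
    (fun dinamicChart i =>
      dinamicChart ++
        [(PySem.List.pyRange 0 100 1).foldl
          (fun temp j =>
            if (j + 1) ∈ PySem.List.pyGetD matrix i [] then temp ++ [(1 : Int)]
            else temp ++ [(0 : Int)])
          []])
    []

-- ===== PORT B =====
def scatterRow (row : List Int) : List Int :=
  row.foldl
    (fun temp v => if 1 ≤ v ∧ v ≤ 100 then temp.set (v - 1).toNat 1 else temp)
    (List.replicate 100 (0 : Int))

def dinamic_chart_alt (matrix : List (List Int)) : List (List Int) :=
  matrix.map scatterRow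

-- ===== PRECONDITION & SPEC =====
def Spec_dinamic_chart (matrix : List (List Int)) (out : List (List Int)) : Prop := out = dinamic_chart_alt matrix
instance (matrix : List (List Int)) (out : List (List Int)) : Decidable (Spec_dinamic_chart matrix out) := by unfold Spec_dinamic_chart; infer_instance

-- ===== CLAIM (what is proved, stated in full; the proofs are below) =====
def Claim_equal_dinamic_chart : Prop := ∀ (matrix : List (List Int)), Dom_dinamic_chart matrix → Spec_dinamic_chart matrix (dinamic_chart matrix)

-- ===== LEMMAS AND PROOFS =====

-- the value left at each slot after scattering a row into `temp`
lemma scatter_char (row : List Int) (temp : List Int) (h : temp.length = 100) :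
    row.foldl
      (fun temp v => if 1 ≤ v ∧ v ≤ 100 then temp.set (v - 1).toNat 1 else temp)
      temp
    = (List.range 100).map
        (fun (i : Nat) => if ((i : Int) + 1) ∈ row then (1 : Int) else temp.getD i 0) := by
  induction row generalizing temp with
  | nil =>
      apply List.ext_getElem
      · simp [h]
      · intro i h1 h2
        simp only [List.foldl_nil] at h1
        simp [List.getD_eq_getElem?_getD, List.getElem?_eq_getElem h1]
  | cons v row ih =>
      simp only [List.foldl_cons]
      rw [ih _ (by split <;> simp [h])]
      apply List.map_congr_left
      intro i hi
      simp only [List.mem_range] at hi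
      by_cases hm : ((i : Int) + 1) ∈ row
      · simp [hm]
      · by_cases hv : ((i : Int) + 1) = v
        · have hmem : ((i : Int) + 1) ∈ v :: row := by simp [hv]
          have hr : 1 ≤ v ∧ v ≤ 100 := by omega
          simp only [if_pos hmem, if_neg hm, if_pos hr]
          rw [List.getD_eq_getElem?_getD, List.getElem?_set]
          have : (v - 1).toNat = i := by omega
          simp [this, h, hi]
        · have hmem : ¬ ((i : Int) + 1) ∈ v :: row := by simp [hv, hm]
          simp only [if_neg hmem, if_neg hm]
          split
          · rename_i hr
            rw [List.getD_eq_getElem?_getD, List.getElem?_set,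
              if_neg (by omega : ¬ (v - 1).toNat = i), ← List.getD_eq_getElem?_getD]
          · rfl

lemma row_eq (row : List Int) :
    (PySem.List.pyRange 0 100 1).foldl
      (fun temp j => if (j + 1) ∈ row then temp ++ [(1 : Int)] else temp ++ [(0 : Int)])
      []
    = scatterRow row := by
  have h0 : (fun (temp : List Int) (j : Int) =>
        if (j + 1) ∈ row then temp ++ [(1 : Int)] else temp ++ [(0 : Int)])
      = (fun temp j => temp ++ [if (j + 1) ∈ row then (1 : Int) else 0]) := by
    funext temp j; split <;> rfl
  rw [h0, PySem.List.foldl_append_singleton_eq_map, List.nil_append,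
    scatterRow, scatter_char row _ (by simp), PySem.List.pyRange_one]
  simp only [List.map_map, Function.comp_def, Int.zero_add]
  apply List.map_congr_left
  intro i hi
  simp only [List.mem_range] at hi
  rw [List.getD_eq_getElem?_getD, List.getElem?_replicate, if_pos (show i < 100 by omega)]
  rfl

-- ===== VERDICT (by name: the statement is the Claim_ definition above) =====
theorem dinamic_chart_spec : Claim_equal_dinamic_chart := by
  intro matrix _
  unfold Spec_dinamic_chart dinamic_chart dinamic_chart_alt
  rw [show ((matrix.length : Int)) = PySem.List.len matrix from rfl,
    PySem.List.foldl_pyRange_zero_pyGetD matrix ([] : List Int)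
      (fun dinamicChart row => dinamicChart ++
        [(PySem.List.pyRange 0 100 1).foldl
          (fun temp j =>
            if (j + 1) ∈ row then temp ++ [(1 : Int)] else temp ++ [(0 : Int)]) []])
      []]
  have h2 : (fun (dinamicChart : List (List Int)) (row : List Int) => dinamicChart ++
        [(PySem.List.pyRange 0 100 1).foldl
          (fun temp j =>
            if (j + 1) ∈ row then temp ++ [(1 : Int)] else temp ++ [(0 : Int)]) []])
      = (fun dinamicChart row => dinamicChart ++ [scatterRow row]) := by
    funext dc row; rw [row_eq row]
  rw [h2, PySem.List.foldl_append_singleton_eq_map, List.nil_append]
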